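-- pv_equiv track=rewrite | github.com/MilanMavani/BESS_Dashboard | src/plot_utils.py | _build_unique_legend_labels
-- ===== SOURCE A (Python) =====
-- from typing import List, Tuple, Dict
--
-- def _build_unique_legend_labels(series_keys_in_order: List[str], base_labels: Dict[str, str]) -> Dict[str, str]:
--     """Ensures legend labels are unique by appending a count if necessary (e.g., 'Label (2)')."""
--     counts: Dict[str, int] = {}
--     out: Dict[str, str] = {}
--     for k in series_keys_in_order:
--         base = base_labels[k]
--         n = counts.get(base, 0) + 1
--         counts[base] = n
--         if n == 1:
--             out[k] = base
--         else:
--             out[k] = f"{base} ({n})"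
--     return out
-- ===== SOURCE B (Python) =====
-- from typing import List, Dict
--
-- def _build_unique_legend_labels(series_keys_in_order: List[str], base_labels: Dict[str, str]) -> Dict[str, str]:
--     """Group keys by base label, then number each group; emit in original key order."""
--     groups: Dict[str, List[str]] = {}
--     for k in series_keys_in_order:
--         groups.setdefault(base_labels[k], []).append(k)
--     labels: Dict[str, str] = {}
--     for base, keys in groups.items():
--         for i, k in enumerate(keys):
--             labels[k] = base if i == 0 else f"{base} ({i + 1})"
--     return {k: labels[k] for k in series_keys_in_order}
-- ===== Notes on version B (the rewrite author's own statement) =====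
-- stated objective: alternative
-- what changed: Replaces the single pass with a running per-base counter by a group-then-label decomposition: first index keys by base label, then number each group by its enumerate position, then emit labels in the original key order.
import Mathlib
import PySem

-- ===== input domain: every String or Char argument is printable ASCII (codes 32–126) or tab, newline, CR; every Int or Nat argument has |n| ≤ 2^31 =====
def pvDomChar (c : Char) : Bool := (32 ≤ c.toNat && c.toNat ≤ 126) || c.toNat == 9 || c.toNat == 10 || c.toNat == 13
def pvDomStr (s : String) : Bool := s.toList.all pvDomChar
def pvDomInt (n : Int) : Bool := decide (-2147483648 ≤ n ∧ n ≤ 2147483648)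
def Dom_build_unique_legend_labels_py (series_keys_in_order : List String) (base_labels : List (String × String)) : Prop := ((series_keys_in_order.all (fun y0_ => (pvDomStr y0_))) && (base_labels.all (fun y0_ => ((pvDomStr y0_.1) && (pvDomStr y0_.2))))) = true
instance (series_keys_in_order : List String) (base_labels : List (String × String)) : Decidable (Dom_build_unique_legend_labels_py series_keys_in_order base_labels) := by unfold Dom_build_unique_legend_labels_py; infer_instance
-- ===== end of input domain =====

-- B replaces A's single pass with a running per-base counter by a group-then-label
-- decomposition (index keys by base label, number each group, emit in original order);
-- same asymptotic cost, proved to return the same dict on all inputs where A returns.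


-- ===== PORT A =====
def build_unique_legend_labels_py (series_keys_in_order : List String) (base_labels : List (String × String)) : List (String × String) :=
  (series_keys_in_order.foldl
    (fun (st : PySem.Dict String Int × PySem.Dict String String) k =>
      let base := (PySem.Dict.mk base_labels).getD k ""   -- base_labels[k]; KeyError excluded by Pre_
      let n := st.1.getD base 0 + 1
      (st.1.insert base n,
       if n == 1 then st.2.insert k base
       else st.2.insert k (base ++ " (" ++ PySem.Int.toStr n ++ ")")))
    (PySem.Dict.empty, PySem.Dict.empty)).2.items

-- ===== PORT B =====
def build_unique_legend_labels_py_alt (series_keys_in_order : List String) (base_labels : List (String × String)) : List (String × String) :=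
  let groups : PySem.Dict String (List String) :=
    series_keys_in_order.foldl
      (fun g k => g.modify ((PySem.Dict.mk base_labels).getD k "") [] (· ++ [k]))
      PySem.Dict.empty
  let labels : PySem.Dict String String :=
    groups.items.foldl
      (fun lab p =>
        (PySem.List.enumerate p.2).foldl
          (fun lab2 ik =>
            lab2.insert ik.2 (if ik.1 == 0 then p.1
              else p.1 ++ " (" ++ PySem.Int.toStr (ik.1 + 1) ++ ")"))
          lab)
      PySem.Dict.empty
  (series_keys_in_order.foldl
    (fun (out : PySem.Dict String String) k => out.insert k (labels.getD k ""))
    PySem.Dict.empty).items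

-- ===== PRECONDITION & SPEC =====
-- Pre_ excludes exactly the inputs where the Python raises KeyError: a series key missing from base_labels.
def Pre_build_unique_legend_labels_py (series_keys_in_order : List String) (base_labels : List (String × String)) : Prop :=
  ∀ k ∈ series_keys_in_order, k ∈ base_labels.map (·.1)
instance (series_keys_in_order : List String) (base_labels : List (String × String)) : Decidable (Pre_build_unique_legend_labels_py series_keys_in_order base_labels) := by unfold Pre_build_unique_legend_labels_py; infer_instance

def pvWitness_build_unique_legend_labels_py : List String × (List (String × String)) :=
  (["a", "b", "c", "a"], [("a", "X"), ("b", "X"), ("c", "Y")])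

def Spec_build_unique_legend_labels_py (series_keys_in_order : List String) (base_labels : List (String × String)) (out : List (String × String)) : Prop := out = build_unique_legend_labels_py_alt series_keys_in_order base_labels
instance (series_keys_in_order : List String) (base_labels : List (String × String)) (out : List (String × String)) : Decidable (Spec_build_unique_legend_labels_py series_keys_in_order base_labels out) := by unfold Spec_build_unique_legend_labels_py; infer_instance

-- ===== CLAIM (what is proved, stated in full; the proofs are below) =====
def Claim_equal_build_unique_legend_labels_py : Prop := ∀ (series_keys_in_order : List String) (base_labels : List (String × String)), Dom_build_unique_legend_labels_py series_keys_in_order base_labels → Pre_build_unique_legend_labels_py series_keys_in_order base_labels → Spec_build_unique_legend_labels_py series_keys_in_order base_labels (build_unique_legend_labels_py series_keys_in_order base_labels)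

-- ===== LEMMAS AND PROOFS =====

-- the base label of a key, total via default "" (Pre_ excludes the KeyError case)
def pvBase (bl : List (String × String)) (k : String) : String := (PySem.Dict.mk bl).getD k ""
-- A's label for the n-th occurrence of a base
def pvLab (c : String) (n : Int) : String := if n == 1 then c else c ++ " (" ++ PySem.Int.toStr n ++ ")"
-- the (key, label) pairs A inserts, occurrence by occurrence; p = already-processed prefix
def pvLabpairs (bl : List (String × String)) (p s : List String) : List (String × String) :=
  match s with
  | [] => []
  | k :: t => (k, pvLab (pvBase bl k) (((p.map (pvBase bl)).count (pvBase bl k) : Int) + 1))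
      :: pvLabpairs bl (p ++ [k]) t
-- folding a list of pairs into a dict by insertion
def pvIns (ps : List (String × String)) (d : PySem.Dict String String) : PySem.Dict String String :=
  ps.foldl (fun d p => d.insert p.1 p.2) d
-- the (key, label) pairs B's inner enumerate loop inserts for one group
def pvE (c : String) (j : Int) (g : List String) : List (String × String) :=
  (PySem.List.enumerate g j).map (fun ik => (ik.2, pvLab c (ik.1 + 1)))
-- B's grouping dict
def pvGroups (bl : List (String × String)) (s : List String) : PySem.Dict String (List String) :=
  s.foldl (fun g k => g.modify ((PySem.Dict.mk bl).getD k "") [] (· ++ [k])) PySem.Dict.empty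
-- the full (key, label) insertion sequence of B's second loop
def pvLL (bl : List (String × String)) (s : List String) : List (String × String) :=
  (pvGroups bl s).items.flatMap (fun p => pvE p.1 0 p.2)

theorem counter_step (xs : List String) (b : String) :
    (PySem.Dict.counter xs).insert b ((xs.count b : Int) + 1) = PySem.Dict.counter (xs ++ [b]) := by
  rw [PySem.Dict.counter_append_singleton]
  show _ = (PySem.Dict.counter xs).insert b ((PySem.Dict.counter xs).getD b 0 + 1)
  rw [PySem.Dict.getD_counter]

theorem ins_lab (o : PySem.Dict String String) (k c : String) (n : Int) :
    (if (n == 1) = true then o.insert k c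
     else o.insert k (c ++ " (" ++ PySem.Int.toStr n ++ ")")) = o.insert k (pvLab c n) := by
  unfold pvLab; split <;> rfl

-- A's loop, characterised: its out-dict is the insertion fold of the per-occurrence label pairs
theorem A_char (bl : List (String × String)) (s : List String) :
    ∀ (p : List String) (o : PySem.Dict String String),
    (s.foldl
      (fun (st : PySem.Dict String Int × PySem.Dict String String) k =>
        let base := (PySem.Dict.mk bl).getD k ""
        let n := st.1.getD base 0 + 1
        (st.1.insert base n,
         if n == 1 then st.2.insert k base
         else st.2.insert k (base ++ " (" ++ PySem.Int.toStr n ++ ")")))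
      (PySem.Dict.counter (p.map (pvBase bl)), o)).2 = pvIns (pvLabpairs bl p s) o := by
  induction s with
  | nil => intro p o; simp [pvLabpairs, pvIns]
  | cons k t ih =>
    intro p o
    have hb : (PySem.Dict.mk bl).getD k "" = pvBase bl k := rfl
    simp only [List.foldl_cons, hb, PySem.Dict.getD_counter]
    rw [counter_step, ins_lab]
    have := ih (p ++ [k]) (o.insert k (pvLab (pvBase bl k) ((List.count (pvBase bl k) (List.map (pvBase bl) p) : Int) + 1)))
    simp only [List.map_append, List.map_cons, List.map_nil] at this
    rw [this]
    simp [pvLabpairs, pvIns]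

-- lookup in an insertion fold = last matching pair, else the base dict
theorem pvIns_get? (ps : List (String × String)) :
    ∀ (d : PySem.Dict String String) (k : String),
    (pvIns ps d).get? k =
      match ps.reverse.find? (fun p => p.1 == k) with
      | some q => some q.2
      | none => d.get? k := by
  induction ps with
  | nil => intro d k; simp [pvIns]
  | cons p ps ih =>
    intro d k
    show (pvIns ps (d.insert p.1 p.2)).get? k = _
    rw [ih]
    simp only [List.reverse_cons, List.find?_append]
    cases h : ps.reverse.find? (fun p => p.1 == k) with
    | some q => simp
    | none =>
      simp only [Option.none_or, List.find?_singleton]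
      by_cases hk : p.1 = k
      · subst hk; simp [PySem.Dict.get?_insert_self]
      · simp [hk, PySem.Dict.get?_insert_of_ne _ _ (Ne.symm hk)]

theorem pvIns_keys (ps : List (String × String)) (d : PySem.Dict String String) :
    (pvIns ps d).keys = PySem.Set.update d.keys (ps.map (·.1)) :=
  PySem.Dict.keys_foldl_insert_key ps (·.1) (fun _ p => p.2) d

theorem pvIns_nodup (ps : List (String × String)) (d : PySem.Dict String String)
    (h : d.keys.Nodup) : (pvIns ps d).keys.Nodup :=
  PySem.Dict.nodup_keys_foldl_insert_key ps (·.1) (fun _ p => p.2) d h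

theorem groups_getD (bl : List (String × String)) (s : List String) (c : String) :
    (pvGroups bl s).getD c [] = s.filter (fun y => pvBase bl y == c) := by
  unfold pvGroups
  rw [show (s.foldl (fun g k => g.modify ((PySem.Dict.mk bl).getD k "") [] (· ++ [k])) PySem.Dict.empty)
      = ((s.map (fun k => (pvBase bl k, k))).foldl (fun g p => g.modify p.1 [] (· ++ [p.2])) PySem.Dict.empty) from by
    rw [List.foldl_map]
    rfl]
  rw [PySem.Dict.getD_foldl_modify_append]
  simp [PySem.Dict.getD_empty, List.filter_map, Function.comp_def]

theorem groups_keys (bl : List (String × String)) (s : List String) :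
    (pvGroups bl s).keys = PySem.Set.ofList (s.map (pvBase bl)) := by
  unfold pvGroups
  show (List.foldl (fun g k => g.modify (pvBase bl k) [] (· ++ [k])) PySem.Dict.empty s).keys = _
  rw [PySem.Dict.keys_foldl_modify_key s (pvBase bl) [] (fun _ k => (· ++ [k])) PySem.Dict.empty]
  simp [PySem.Set.ofList_eq_foldl, PySem.Set.update, PySem.Dict.keys_empty]

theorem groups_nodup (bl : List (String × String)) (s : List String) :
    (pvGroups bl s).keys.Nodup :=
  PySem.Dict.nodup_keys_foldl_modify_key s (pvBase bl) [] (fun _ k => (· ++ [k])) PySem.Dict.empty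
    (by simp)

theorem labE_eq (c : String) (i : Int) :
    (if (i == 0) = true then c else c ++ " (" ++ PySem.Int.toStr (i + 1) ++ ")") = pvLab c (i + 1) := by
  unfold pvLab
  by_cases h : i = 0
  · subst h; rfl
  · rw [if_neg (by simpa using h), if_neg (by simpa using fun hh : i + 1 = 1 => h (by omega))]

-- B's inner enumerate loop is the insertion fold of that group's label pairs
theorem inner_fold_eq (c : String) (g : List String) (lab : PySem.Dict String String) :
    (PySem.List.enumerate g).foldl
      (fun lab2 ik => lab2.insert ik.2 (if ik.1 == 0 then c
        else c ++ " (" ++ PySem.Int.toStr (ik.1 + 1) ++ ")")) lab = pvIns (pvE c 0 g) lab := by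
  unfold pvIns pvE
  rw [List.foldl_map]
  apply PySem.List.foldl_congr_mem
  intro acc ik _
  rw [labE_eq]

theorem outer_fold_eq (L : List (String × List String)) :
    ∀ (lab : PySem.Dict String String),
    L.foldl (fun lab p => pvIns (pvE p.1 0 p.2) lab) lab = pvIns (L.flatMap (fun p => pvE p.1 0 p.2)) lab := by
  induction L with
  | nil => intro lab; simp [pvIns]
  | cons p L ih =>
    intro lab
    rw [List.foldl_cons, ih]
    unfold pvIns
    rw [List.flatMap_cons, List.foldl_append]

theorem labpairs_keys (bl : List (String × String)) (s : List String) :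
    ∀ p, (pvLabpairs bl p s).map (·.1) = s := by
  induction s with
  | nil => intro p; simp [pvLabpairs]
  | cons y t ih => intro p; simp [pvLabpairs, ih (p ++ [y])]

theorem find?_rev_congr (l1 l2 : List (String × String)) (pk : String × String → Bool)
    (h : l1.filter pk = l2.filter pk) : l1.reverse.find? pk = l2.reverse.find? pk := by
  rw [← List.head?_filter, ← List.head?_filter, List.filter_reverse, List.filter_reverse, h]

theorem labpairs_filter_nil (bl : List (String × String)) (s p : List String) (k : String)
    (hk : k ∉ s) : (pvLabpairs bl p s).filter (fun q => q.1 == k) = [] := by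
  rw [List.filter_eq_nil_iff]
  intro q hq
  have : q.1 ∈ (pvLabpairs bl p s).map (·.1) := List.mem_map_of_mem hq
  rw [labpairs_keys] at this
  simp only [beq_iff_eq]
  intro hq1; exact hk (hq1 ▸ this)

theorem pvE_fst_mem (c : String) (j : Int) (g : List String) (q : String × String)
    (hq : q ∈ pvE c j g) : q.1 ∈ g := by
  unfold pvE at hq
  obtain ⟨ik, hik, rfl⟩ := List.mem_map.mp hq
  obtain ⟨m, hm, rfl⟩ := (PySem.List.mem_enumerate_iff _ _ _).mp hik
  exact List.getElem_mem hm

theorem pvE_filter_nil (bl : List (String × String)) (s : List String) (k c' : String) (j : Int)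
    (hne : c' ≠ pvBase bl k) :
    (pvE c' j (s.filter (fun y => pvBase bl y == c'))).filter (fun q => q.1 == k) = [] := by
  rw [List.filter_eq_nil_iff]
  intro q hq
  have h1 := pvE_fst_mem _ _ _ _ hq
  have h2 := (List.mem_filter.mp h1).2
  simp only [beq_iff_eq] at h2 ⊢
  intro hq1
  exact hne (by rw [← h2, hq1])

theorem flatten_one_hot (c : String) (G : String → List (String × String)) :
    ∀ (L : List String), L.Nodup → (∀ c' ∈ L, c' ≠ c → G c' = []) →
    (L.map G).flatten = if c ∈ L then G c else [] := by
  intro L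
  induction L with
  | nil => simp
  | cons a L ih =>
    intro hnd h
    simp only [List.map_cons, List.flatten_cons]
    by_cases hac : a = c
    · subst hac
      have : ∀ c' ∈ L, c' ≠ a → G c' = [] := fun c' hc' => h c' (List.mem_cons_of_mem _ hc')
      have hGnil : ∀ c' ∈ L, G c' = [] := by
        intro c' hc'
        exact this c' hc' (fun he => ((List.nodup_cons.mp hnd).1 (he ▸ hc')))
      have : (L.map G).flatten = [] := by
        rw [List.flatten_eq_nil_iff]
        intro l hl
        obtain ⟨c', hc', rfl⟩ := List.mem_map.mp hl
        exact hGnil c' hc'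
      simp [this]
    · rw [h a List.mem_cons_self hac]
      rw [ih (List.nodup_cons.mp hnd).2 (fun c' hc' => h c' (List.mem_cons_of_mem _ hc'))]
      simp only [List.mem_cons]
      by_cases hc : c ∈ L
      · simp [hc]
      · simp [hc]
        intro he
        exact absurd he.symm hac

-- the big per-occurrence correspondence: A's label pairs and B's group label pairs
-- agree after filtering to any single key
theorem core (bl : List (String × String)) (k : String) (s : List String) :
    ∀ (p : List String),
    (pvLabpairs bl p s).filter (fun q => q.1 == k) =
    (pvE (pvBase bl k) ((p.map (pvBase bl)).count (pvBase bl k))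
        (s.filter (fun y => pvBase bl y == pvBase bl k))).filter (fun q => q.1 == k) := by
  induction s with
  | nil => intro p; simp [pvLabpairs, pvE]
  | cons y t ih =>
    intro p
    by_cases hby : pvBase bl y = pvBase bl k
    · have hcnt : ((p ++ [y]).map (pvBase bl)).count (pvBase bl k)
          = (p.map (pvBase bl)).count (pvBase bl k) + 1 := by
        simp [List.count_append, hby]
      rw [show (y :: t).filter (fun y => pvBase bl y == pvBase bl k)
          = y :: t.filter (fun y => pvBase bl y == pvBase bl k) from by simp [hby]]
      rw [show pvE (pvBase bl k) ((p.map (pvBase bl)).count (pvBase bl k))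
            (y :: t.filter (fun y => pvBase bl y == pvBase bl k))
          = (y, pvLab (pvBase bl k) (((p.map (pvBase bl)).count (pvBase bl k) : Int) + 1))
            :: pvE (pvBase bl k) (((p ++ [y]).map (pvBase bl)).count (pvBase bl k))
                (t.filter (fun y => pvBase bl y == pvBase bl k)) from by
        unfold pvE
        rw [PySem.List.enumerate_cons, List.map_cons, hcnt]
        push_cast
        rfl]
      unfold pvLabpairs
      rw [List.filter_cons, List.filter_cons]
      rw [ih (p ++ [y])]
      rw [hby]
    · have hyk : (y == k) = false := by
        apply beq_eq_false_iff_ne.mpr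
        intro h; exact hby (by rw [h])
      have hcnt : ((p ++ [y]).map (pvBase bl)).count (pvBase bl k)
          = (p.map (pvBase bl)).count (pvBase bl k) := by
        simp [List.count_append, hby]
      unfold pvLabpairs
      rw [List.filter_cons]
      simp only [hyk, Bool.false_eq_true, if_false]
      rw [ih (p ++ [y]), hcnt]
      rw [show (y :: t).filter (fun y => pvBase bl y == pvBase bl k)
          = t.filter (fun y => pvBase bl y == pvBase bl k) from by simp [hby]]

-- B's full insertion sequence filters to the same pairs as A's, for every key
theorem LL_filter_eq (bl : List (String × String)) (s : List String) (k : String) :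
    (pvLL bl s).filter (fun q => q.1 == k) = (pvLabpairs bl [] s).filter (fun q => q.1 == k) := by
  unfold pvLL
  rw [List.filter_flatMap]
  rw [List.flatMap_def]
  rw [PySem.Dict.items_eq_map_keys (pvGroups bl s) (groups_nodup bl s) []]
  rw [List.map_map]
  have hmapped : (List.map ((fun p => List.filter (fun q => q.1 == k) (pvE p.1 0 p.2)) ∘
        fun c' => (c', (pvGroups bl s).getD c' []))
      ((pvGroups bl s).keys))
      = (pvGroups bl s).keys.map (fun c' => (pvE c' 0 ((pvGroups bl s).getD c' [])).filter (fun q => q.1 == k)) := rfl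
  rw [hmapped]
  rw [flatten_one_hot (pvBase bl k)
    (fun c' => (pvE c' 0 ((pvGroups bl s).getD c' [])).filter (fun q => q.1 == k))
    ((pvGroups bl s).keys) (groups_nodup bl s)
    (by
      intro c' _ hne
      show (pvE c' 0 ((pvGroups bl s).getD c' [])).filter (fun q => q.1 == k) = []
      rw [groups_getD]
      exact pvE_filter_nil bl s k c' 0 hne)]
  by_cases hc : pvBase bl k ∈ (pvGroups bl s).keys
  · rw [if_pos hc, groups_getD]
    have := core bl k s []
    simp only [List.map_nil, List.count_nil, Int.natCast_zero] at this
    rw [← this]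
  · rw [if_neg hc]
    have hk : k ∉ s := by
      intro hks
      apply hc
      rw [groups_keys]
      exact (PySem.Set.mem_ofList _ _).mpr (List.mem_map_of_mem hks)
    rw [labpairs_filter_nil bl s [] k hk]

theorem find?_beq (k : String) : ∀ (l : List String),
    l.find? (fun x => x == k) = if k ∈ l then some k else none := by
  intro l
  induction l with
  | nil => simp
  | cons a l ih =>
    rw [List.find?_cons]
    by_cases hak : a = k
    · subst hak; simp
    · simp only [List.mem_cons]
      rw [show ((a == k) : Bool) = false from beq_eq_false_iff_ne.mpr hak]
      simp only [ih]
      by_cases hkl : k ∈ l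
      · simp [hkl]
      · simp [hkl]
        intro he
        exact absurd he.symm hak

-- A's dict and B's labels dict agree on every lookup
theorem labels_get?_eq (bl : List (String × String)) (s : List String) (k : String) :
    (pvIns (pvLL bl s) PySem.Dict.empty).get? k
      = (pvIns (pvLabpairs bl [] s) PySem.Dict.empty).get? k := by
  rw [pvIns_get?, pvIns_get?,
    find?_rev_congr _ _ (fun q => q.1 == k) (LL_filter_eq bl s k)]

-- if k occurs in s, A's dict has a value for it
theorem A_get?_isSome (bl : List (String × String)) (s : List String) (k : String) (hk : k ∈ s) :
    ∃ v, (pvIns (pvLabpairs bl [] s) PySem.Dict.empty).get? k = some v := by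
  rw [pvIns_get?]
  have hex : ∃ q ∈ pvLabpairs bl [] s, (fun (q : String × String) => q.1 == k) q = true := by
    have : k ∈ (pvLabpairs bl [] s).map (·.1) := by rw [labpairs_keys]; exact hk
    obtain ⟨q, hq, hq1⟩ := List.mem_map.mp this
    exact ⟨q, hq, by simp [hq1]⟩
  obtain ⟨q, hq, hq1⟩ := hex
  cases h : (pvLabpairs bl [] s).reverse.find? (fun q => q.1 == k) with
  | some q' => exact ⟨q'.2, rfl⟩
  | none =>
    exact absurd (List.find?_eq_none.mp h q (List.mem_reverse.mpr hq) hq1) (by simp)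

-- the final rebuild of B agrees with A's dict on every lookup
theorem final_get?_eq (bl : List (String × String)) (s : List String) (k : String) :
    (pvIns (s.map (fun k' => (k', (pvIns (pvLL bl s) PySem.Dict.empty).getD k' ""))) PySem.Dict.empty).get? k
      = (pvIns (pvLabpairs bl [] s) PySem.Dict.empty).get? k := by
  rw [pvIns_get?]
  rw [← List.map_reverse, List.find?_map]
  have : ((fun (q : String × String) => q.1 == k) ∘
      (fun k' => (k', (pvIns (pvLL bl s) PySem.Dict.empty).getD k' ""))) = fun k' => k' == k := rfl
  rw [this, find?_beq]
  by_cases hk : k ∈ s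
  · rw [if_pos (List.mem_reverse.mpr hk)]
    obtain ⟨v, hv⟩ := A_get?_isSome bl s k hk
    rw [hv]
    simp only [Option.map_some]
    rw [PySem.Dict.getD_eq_get?_getD, labels_get?_eq bl s k, hv]
    rfl
  · rw [if_neg (fun h => hk (List.mem_reverse.mp h))]
    simp only [Option.map_none]
    rw [pvIns_get?]
    rw [show (pvLabpairs bl [] s).reverse.find? (fun q => q.1 == k) = none from by
      rw [← List.head?_filter, List.filter_reverse, labpairs_filter_nil bl s [] k hk]
      rfl]

-- both result dicts are equal as dicts
theorem dicts_eq (bl : List (String × String)) (s : List String) :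
    pvIns (s.map (fun k' => (k', (pvIns (pvLL bl s) PySem.Dict.empty).getD k' ""))) PySem.Dict.empty
      = pvIns (pvLabpairs bl [] s) PySem.Dict.empty := by
  apply PySem.Dict.ext
  have ndB := pvIns_nodup (s.map (fun k' => (k', (pvIns (pvLL bl s) PySem.Dict.empty).getD k' "")))
    PySem.Dict.empty (by simp)
  have ndA := pvIns_nodup (pvLabpairs bl [] s) PySem.Dict.empty (by simp)
  rw [PySem.Dict.items_eq_map_keys _ ndB "", PySem.Dict.items_eq_map_keys _ ndA ""]
  have hkeys : (pvIns (s.map (fun k' => (k', (pvIns (pvLL bl s) PySem.Dict.empty).getD k' ""))) PySem.Dict.empty).keys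
      = (pvIns (pvLabpairs bl [] s) PySem.Dict.empty).keys := by
    rw [pvIns_keys, pvIns_keys, labpairs_keys]
    congr 1
    rw [List.map_map]
    exact (List.map_congr_left (fun a _ => rfl)).trans (List.map_id _)
  rw [hkeys]
  apply List.map_congr_left
  intro x _
  rw [PySem.Dict.getD_eq_get?_getD, PySem.Dict.getD_eq_get?_getD, final_get?_eq]

-- port A in characterised form
theorem A_char_top (bl : List (String × String)) (s : List String) :
    build_unique_legend_labels_py s bl = (pvIns (pvLabpairs bl [] s) PySem.Dict.empty).items := by
  unfold build_unique_legend_labels_py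
  rw [show (PySem.Dict.empty : PySem.Dict String Int)
      = PySem.Dict.counter (([] : List String).map (pvBase bl)) from rfl]
  rw [A_char bl s [] PySem.Dict.empty]

-- port B in characterised form
theorem B_char_top (bl : List (String × String)) (s : List String) :
    build_unique_legend_labels_py_alt s bl
      = (pvIns (s.map (fun k' => (k', (pvIns (pvLL bl s) PySem.Dict.empty).getD k' ""))) PySem.Dict.empty).items := by
  unfold build_unique_legend_labels_py_alt
  simp only [inner_fold_eq]
  rw [outer_fold_eq]
  rw [show pvIns (s.map (fun k' => (k', (pvIns (pvLL bl s) PySem.Dict.empty).getD k' ""))) PySem.Dict.empty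
      = s.foldl (fun out k => out.insert k ((pvIns (pvLL bl s) PySem.Dict.empty).getD k "")) PySem.Dict.empty from by
    unfold pvIns
    rw [List.foldl_map]]
  rfl

-- ===== VERDICT (by name: the statement is the Claim_ definition above) =====
theorem build_unique_legend_labels_py_spec : Claim_equal_build_unique_legend_labels_py := by
  intro s bl _ _
  unfold Spec_build_unique_legend_labels_py
  rw [A_char_top, B_char_top, dicts_eq]
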